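-- pv_equiv track=rewrite | github.com/Jessiewangyuji/CS5430 | A4/entropy.py | simple_transformation
-- ===== SOURCE A (Python) =====
-- def simple_transformation(password):
--
-- 	num_char = {}
-- 	num_char['0'] = 'o'
-- 	num_char['1'] = 'l'
-- 	num_char['3'] = 'e'
-- 	num_char['4'] = 'a'
-- 	num_char['5'] = 's'
-- 	num_char['7'] = 't'
-- 	num_char['8'] = 'b'
-- 	num_char['@'] = 'a'
-- 	num_char['$'] = 's'
--
--
-- 	transformed = password.lower()
--
-- 	transformed = ''.join([num_char[i] if i in num_char else i for i in transformed])
--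
-- 	return transformed
-- ===== SOURCE B (Python) =====
-- def simple_transformation(password):
--     return (password.lower()
--             .replace('0', 'o')
--             .replace('1', 'l')
--             .replace('3', 'e')
--             .replace('4', 'a')
--             .replace('5', 's')
--             .replace('7', 't')
--             .replace('8', 'b')
--             .replace('@', 'a')
--             .replace('$', 's'))
-- ===== Notes on version B (the rewrite author's own statement) =====
-- stated objective: idiomatic
-- what changed: Replaced the hand-built dict plus per-character comprehension/join with a chain of nine str.replace calls after lower(); safe because no replacement output is itself a replacement source.
import Mathlib
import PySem

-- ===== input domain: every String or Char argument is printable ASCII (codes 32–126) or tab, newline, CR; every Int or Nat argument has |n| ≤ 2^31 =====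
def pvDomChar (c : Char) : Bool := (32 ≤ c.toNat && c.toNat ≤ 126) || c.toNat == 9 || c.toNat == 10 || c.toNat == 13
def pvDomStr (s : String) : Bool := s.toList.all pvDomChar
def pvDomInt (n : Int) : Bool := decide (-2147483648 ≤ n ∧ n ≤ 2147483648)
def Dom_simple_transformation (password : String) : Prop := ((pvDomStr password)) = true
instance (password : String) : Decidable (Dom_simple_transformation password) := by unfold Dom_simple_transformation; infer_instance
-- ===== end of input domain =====

-- B replaces the dict-lookup comprehension with a chain of nine str.replace calls after lower() (idiomatic; same result since no replacement output is itself a source).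

-- ===== PORT A =====
def numCharDict : PySem.Dict Char Char :=
  ((((((((PySem.Dict.empty.insert '0' 'o').insert '1' 'l').insert '3' 'e').insert '4' 'a').insert
      '5' 's').insert '7' 't').insert '8' 'b').insert '@' 'a').insert '$' 's'

def simple_transformation (password : String) : String :=
  let transformed := PySem.Str.lower password
  let transformed := PySem.Str.join ""
    (transformed.toList.map (fun i =>
      String.ofList [if numCharDict.contains i then (numCharDict.get? i).getD i else i]))
  transformed

-- ===== PORT B =====
def simple_transformation_alt (password : String) : String :=
  PySem.Str.replace (PySem.Str.replace (PySem.Str.replace (PySem.Str.replace (PySem.Str.replace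
    (PySem.Str.replace (PySem.Str.replace (PySem.Str.replace (PySem.Str.replace
      (PySem.Str.lower password) "0" "o") "1" "l") "3" "e") "4" "a") "5" "s") "7" "t")
        "8" "b") "@" "a") "$" "s"

-- ===== PRECONDITION & SPEC =====
def Spec_simple_transformation (password : String) (out : String) : Prop := out = simple_transformation_alt password
instance (password : String) (out : String) : Decidable (Spec_simple_transformation password out) := by unfold Spec_simple_transformation; infer_instance

-- ===== CLAIM (what is proved, stated in full; the proofs are below) =====
def Claim_equal_simple_transformation : Prop := ∀ (password : String), Dom_simple_transformation password → Spec_simple_transformation password (simple_transformation password)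

-- ===== LEMMAS AND PROOFS =====

def subst (a b : Char) : Char → Char := fun c => if c = a then b else c

lemma subst_ne {c a : Char} (h : ¬ c = a) (b : Char) : subst a b c = c := if_neg h

lemma replace_go_single (a b : Char) : ∀ (l acc : List Char) (fuel : Nat), l.length ≤ fuel →
    PySem.Chars.replace.go [a] [b] fuel l acc = acc.reverse ++ l.map (subst a b) := by
  intro l
  induction l with
  | nil =>
    intro acc fuel _
    cases fuel <;> simp [PySem.Chars.replace.go]
  | cons c t ih =>
    intro acc fuel h
    cases fuel with
    | zero => simp at h
    | succ f =>
      simp only [PySem.Chars.replace.go]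
      by_cases hc : c = a
      · subst hc
        rw [if_pos (by simp [List.isPrefixOf])]
        simp only [List.length_cons, List.length_nil, Nat.zero_add, List.drop_succ_cons,
          List.drop_zero]
        rw [ih _ f (by simpa using Nat.succ_le_succ_iff.mp h)]
        simp [subst]
      · rw [if_neg (by simp [List.isPrefixOf, Ne.symm hc])]
        rw [ih _ f (by simpa using Nat.succ_le_succ_iff.mp h)]
        simp [subst, hc]

lemma replace_single (s : List Char) (a b : Char) :
    PySem.Chars.replace s [a] [b] = s.map (subst a b) := by
  simp [PySem.Chars.replace, replace_go_single a b s [] s.length le_rfl]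

lemma char_subst_eq (c : Char) :
    subst '$' 's' (subst '@' 'a' (subst '8' 'b' (subst '7' 't' (subst '5' 's' (subst '4' 'a'
      (subst '3' 'e' (subst '1' 'l' (subst '0' 'o' c))))))))
      = (if numCharDict.contains c then (numCharDict.get? c).getD c else c) := by
  by_cases h0 : c = '0'; · subst h0; decide
  by_cases h1 : c = '1'; · subst h1; decide
  by_cases h3 : c = '3'; · subst h3; decide
  by_cases h4 : c = '4'; · subst h4; decide
  by_cases h5 : c = '5'; · subst h5; decide
  by_cases h7 : c = '7'; · subst h7; decide
  by_cases h8 : c = '8'; · subst h8; decide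
  by_cases ha : c = '@'; · subst ha; decide
  by_cases hs : c = '$'; · subst hs; decide
  rw [subst_ne h0, subst_ne h1, subst_ne h3, subst_ne h4, subst_ne h5, subst_ne h7,
    subst_ne h8, subst_ne ha, subst_ne hs]
  have hc : numCharDict.contains c = false := by
    simp [numCharDict, PySem.Dict.contains_insert, PySem.Dict.contains_empty,
      h0, h1, h3, h4, h5, h7, h8, ha, hs]
  rw [if_neg (by simp [hc])]

lemma map_chain (cs : List Char) :
    ((((((((cs.map (subst '0' 'o')).map (subst '1' 'l')).map (subst '3' 'e')).map
      (subst '4' 'a')).map (subst '5' 's')).map (subst '7' 't')).map (subst '8' 'b')).map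
      (subst '@' 'a')).map (subst '$' 's')
      = cs.map (fun i => if numCharDict.contains i then (numCharDict.get? i).getD i else i) := by
  induction cs with
  | nil => rfl
  | cons c t ih =>
    simp only [List.map_cons]
    rw [char_subst_eq c, ih]

theorem simple_transformation_spec : Claim_equal_simple_transformation := by
  intro password _
  unfold Spec_simple_transformation simple_transformation simple_transformation_alt
  apply String.toList_inj.mp
  simp only [PySem.Str.toList_join, PySem.Str.toList_lower, List.map_map]
  rw [show ("" : String).toList = [] by decide]
  have h1 : List.map (String.toList ∘ fun i =>
        String.ofList [if numCharDict.contains i then (numCharDict.get? i).getD i else i])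
        (PySem.Chars.lower password.toList)
      = List.map (fun c => [c]) (List.map (fun i =>
          if numCharDict.contains i then (numCharDict.get? i).getD i else i)
          (PySem.Chars.lower password.toList)) := by
    simp only [List.map_map]
    exact List.map_congr_left (fun a _ => by simp [Function.comp])
  rw [h1, PySem.Chars.join_nil_singletons]
  simp only [PySem.Str.toList_replace]
  rw [show ("0" : String).toList = ['0'] by decide, show ("o" : String).toList = ['o'] by decide,
    show ("1" : String).toList = ['1'] by decide, show ("l" : String).toList = ['l'] by decide,
    show ("3" : String).toList = ['3'] by decide, show ("e" : String).toList = ['e'] by decide,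
    show ("4" : String).toList = ['4'] by decide, show ("a" : String).toList = ['a'] by decide,
    show ("5" : String).toList = ['5'] by decide, show ("s" : String).toList = ['s'] by decide,
    show ("7" : String).toList = ['7'] by decide, show ("t" : String).toList = ['t'] by decide,
    show ("8" : String).toList = ['8'] by decide, show ("b" : String).toList = ['b'] by decide,
    show ("@" : String).toList = ['@'] by decide, show ("$" : String).toList = ['$'] by decide]
  rw [replace_single, replace_single, replace_single, replace_single, replace_single,
    replace_single, replace_single, replace_single, replace_single]
  simp only [PySem.Str.toList_lower]
  exact (map_chain _).symm
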